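-- pv_equiv track=rewrite | github.com/MinjoonHK/Algorithm | 프로그래머스/1/135808. 과일 장수/과일 장수.py | solution
-- ===== SOURCE A (Python) =====
-- def solution(k, m, score):
--     answer = 0
--     arr = []
--     score.sort()
--     for i in range(len(score),-1,-m):
--         arr.append(score[i:i+m])
--     arr.pop(0)
--     for j in arr:
--         answer += min(j) * m
--
--     return answer
-- ===== SOURCE B (Python) =====
-- def solution(k, m, score):
--     score.sort()
--     n = len(score)
--     return m * sum(score[n % m::m])
-- ===== Notes on version B (the rewrite author's own statement) =====
-- stated objective: simpler
-- what changed: Instead of building a list of boxes from a descending stepped range, popping the empty first slice and scanning each box with min(), B sorts and directly sums the strided slice score[n % m :: m] (each full box's minimum is its first element after sorting) and multiplies by m.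
import Mathlib
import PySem

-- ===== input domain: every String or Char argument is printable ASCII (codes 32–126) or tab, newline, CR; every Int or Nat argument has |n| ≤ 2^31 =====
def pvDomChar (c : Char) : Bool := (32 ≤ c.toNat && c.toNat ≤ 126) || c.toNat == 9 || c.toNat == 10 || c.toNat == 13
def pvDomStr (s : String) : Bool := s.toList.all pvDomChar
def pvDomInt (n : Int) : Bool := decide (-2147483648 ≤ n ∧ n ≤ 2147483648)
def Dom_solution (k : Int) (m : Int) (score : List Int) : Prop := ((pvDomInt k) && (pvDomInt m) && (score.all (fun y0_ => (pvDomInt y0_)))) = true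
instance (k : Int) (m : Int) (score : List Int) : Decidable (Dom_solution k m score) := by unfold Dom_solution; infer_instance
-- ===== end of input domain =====

-- B sums the box minima via one strided slice after sorting instead of A's box list + pop + per-box min scan (objective: simpler).
-- Both A and B sort `score` in place; the theorems below are about the RETURN value (B performs the same mutation).

-- ===== PORT A =====
def solution (k : Int) (m : Int) (score : List Int) : Int :=
  let answer : Int := 0
  let s := PySem.List.sorted score (fun x => x)            -- score.sort()
  let arr : List (List Int) :=
    (PySem.List.pyRange (PySem.List.len s) (-1) (-m)).foldl
      (fun arr i => arr ++ [PySem.List.slice s (some i) (some (i + m))]) []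
  match PySem.List.pop? arr 0 with
  | none => 0        -- arr.pop(0) raises IndexError here (only when m ≤ 0); excluded by Pre_
  | some (_, arr') =>
    arr'.foldl (fun answer j => answer + ((PySem.List.min? j (fun x => x)).getD 0) * m) answer
      -- min(j).getD 0: under Pre_ every remaining box is nonempty, so min? is always `some`

-- ===== PORT B =====
def solution_alt (k : Int) (m : Int) (score : List Int) : Int :=
  let s := PySem.List.sorted score (fun x => x)            -- score.sort()
  let n := PySem.List.len s
  match PySem.List.slice? s (some (PySem.Int.mod n m)) none m with
  | none => 0        -- step m = 0: Python raises ZeroDivisionError at n % m; excluded by Pre_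
  | some xs => m * xs.sum

-- ===== PRECONDITION & SPEC =====
-- Pre_ excludes m ≤ 0, on which A raises (ValueError from range(...,0) when m = 0, IndexError from arr.pop(0) when m < 0).
def Pre_solution (k : Int) (m : Int) (score : List Int) : Prop := 1 ≤ m
instance (k : Int) (m : Int) (score : List Int) : Decidable (Pre_solution k m score) := by unfold Pre_solution; infer_instance
def pvWitness_solution : Int × Int × List Int := (4, 2, [4, 1, 3, 2, 5])
def Spec_solution (k : Int) (m : Int) (score : List Int) (out : Int) : Prop := out = solution_alt k m score
instance (k : Int) (m : Int) (score : List Int) (out : Int) : Decidable (Spec_solution k m score out) := by unfold Spec_solution; infer_instance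

-- ===== CLAIM (what is proved, stated in full; the proofs are below) =====
def Claim_equal_solution : Prop := ∀ (k : Int) (m : Int) (score : List Int), Dom_solution k m score → Pre_solution k m score → Spec_solution k m score (solution k m score)

-- ===== LEMMAS AND PROOFS =====

lemma pyRange_countdown (n M q r : Nat) (m : Int) (hm : m = (M : Int))
    (hM : 0 < M) (hn : n = M * q + r) (hr : r < M) :
    PySem.List.pyRange (n : Int) (-1) (-m) =
      (List.range (q + 1)).map (fun (j : Nat) => (n : Int) - m * (j : Int)) := by
  have h0 : ¬ (-m = 0) := by omega
  have h1 : ¬ (0 < -m) := by omega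
  have h2 : (-1 : Int) < (n : Int) := by omega
  simp only [PySem.List.pyRange, if_neg h0, if_neg h1, if_pos h2]
  have hc : ((n : Int) - -1 + -(-m) - 1) / -(-m) = ((q : Int)) + 1 := by
    subst hm
    rw [neg_neg]
    have he : (n : Int) - -1 + (M : Int) - 1 = (r : Int) + ((q : Int) + 1) * (M : Int) := by
      push_cast [hn]; ring
    rw [he, Int.add_mul_ediv_right _ _ (by omega),
      Int.ediv_eq_zero_of_lt (by omega) (by omega), zero_add]
  rw [hc]
  have ht : ((q : Int) + 1).toNat = q + 1 := by omega
  rw [ht]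
  exact List.map_congr_left (fun k _ => by ring)

lemma filterMap_getElem_range (s : List Int) (idx : Nat → Nat) (q : Nat)
    (h : ∀ k < q, idx k < s.length) :
    List.filterMap (fun k => s[idx k]?) (List.range q) =
      (List.range q).map (fun k => s.getD (idx k) 0) := by
  induction q with
  | zero => rfl
  | succ q ih =>
    rw [List.range_succ, List.filterMap_append, List.map_append,
      ih (fun k hk => h k (by omega))]
    simp [List.getElem?_eq_getElem (h q (by omega))]

lemma slice?_stride (s : List Int) (M q r : Nat) (m : Int) (hm : m = (M : Int))
    (hM : 0 < M) (hn : s.length = M * q + r) (hr : r < M) :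
    PySem.List.slice? s (some (r : Int)) none m =
      some ((List.range q).map (fun (k : Nat) => s.getD (r + M * k) 0)) := by
  have h0 : ¬ (m = 0) := by omega
  have h1 : ¬ (m < 0) := by omega
  have h2 : 0 < m := by omega
  have hrn : ¬ ((r : Int) < 0) := by omega
  simp only [PySem.List.slice?, PySem.List.sliceIndices, if_neg h0, if_neg h1, if_pos h2,
    if_neg hrn]
  have hrle : r ≤ s.length := by rw [hn]; exact Nat.le_add_left r (M * q)
  have hstart : min ((r : Nat) : Int) ((s.length : Nat) : Int) = (r : Int) := by omega
  rw [hstart]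
  have hcount : (if (r : Int) < (s.length : Int) then
      (((s.length : Int) - (r : Int) + m - 1) / m).toNat else 0) = q := by
    by_cases hlt : ((r : Nat) : Int) < (s.length : Int)
    · rw [if_pos hlt]
      subst hm
      have he : (s.length : Int) - (r : Int) + (M : Int) - 1
          = ((M : Int) - 1) + (q : Int) * (M : Int) := by push_cast [hn]; ring
      rw [he, Int.add_mul_ediv_right _ _ (by omega),
        Int.ediv_eq_zero_of_lt (by omega) (by omega), zero_add]
      omega
    · rw [if_neg hlt]
      have hq0 : M * q = 0 := by omega
      rcases Nat.mul_eq_zero.mp hq0 with h | h <;> omega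
  rw [hcount]
  have hfun : (fun x : Nat => s[((r : Int) + m * (x : Int)).toNat]?) =
      fun x : Nat => s[r + M * x]? := by
    funext x
    congr 1
    subst hm
    omega
  rw [hfun, filterMap_getElem_range]
  intro p hp
  have h3 : M * p < M * q := mul_lt_mul_of_pos_left hp hM
  omega

lemma min?_cons_of_le (x : Int) (tl : List Int) (h : ∀ y ∈ tl, x ≤ y) :
    PySem.List.min? (x :: tl) (fun y => y) = some x := by
  induction tl with
  | nil => rfl
  | cons a t ih =>
    have hax : ¬ a < x := not_lt.mpr (h a (by simp))
    have := ih (fun y hy => h y (by simp [hy]))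
    simp only [PySem.List.min?, List.foldl_cons] at this ⊢
    simpa [hax] using this

lemma min?_window_sorted (t : List Int) (ht : t.Pairwise (· ≤ ·)) (i M : Nat)
    (hi : i < t.length) (hM : 0 < M) :
    PySem.List.min? ((t.drop i).take M) (fun x => x) = some (t.getD i 0) := by
  obtain ⟨M', rfl⟩ : ∃ M', M = M' + 1 := ⟨M - 1, by omega⟩
  have hd : t.drop i = t[i] :: t.drop (i + 1) := List.drop_eq_getElem_cons hi
  have hp : ((t.drop i).take (M' + 1)).Pairwise (· ≤ ·) :=
    ht.sublist ((List.take_sublist _ _).trans (List.drop_sublist _ _))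
  rw [hd, List.take_succ_cons] at hp ⊢
  rw [List.pairwise_cons] at hp
  rw [min?_cons_of_le _ _ hp.1, List.getD_eq_getElem _ _ hi]

-- ===== VERDICT (by name: the statement is the Claim_ definition above) =====
theorem solution_spec : Claim_equal_solution := by
  intro k m score _hdom hm
  unfold Pre_solution at hm
  unfold Spec_solution

  obtain ⟨M, hmM⟩ : ∃ M : Nat, m = (M : Int) := ⟨m.toNat, by omega⟩
  have hM : 0 < M := by omega
  simp only [solution, solution_alt]
  set s := PySem.List.sorted score (fun x => x) with hs
  have hsp : s.Pairwise (· ≤ ·) := PySem.List.sorted_pairwise score (fun x => x)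
  set n := s.length with hnn
  set q := n / M with hq
  set r := n % M with hr0
  have hn : n = M * q + r := (Nat.div_add_mod n M).symm
  have hr : r < M := Nat.mod_lt _ hM
  have hlen : PySem.List.len s = (n : Int) := rfl
  rw [hlen, pyRange_countdown n M q r m hmM hM hn hr,
    PySem.List.foldl_append_singleton_eq_map, List.nil_append,
    List.range_succ_eq_map, List.map_cons, List.map_map]
  rw [List.map_cons, PySem.List.pop?_zero_cons]
  dsimp only
  rw [PySem.List.foldl_add, zero_add, List.map_map, List.map_map]
  have hmod : PySem.Int.mod ((n : Nat) : Int) m = ((r : Nat) : Int) := by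
    rw [hmM, hr0]; exact_mod_cast PySem.Int.mod_natCast n M
  rw [hmod, slice?_stride s M q r m hmM hM (by rw [← hnn]; exact hn) hr]
  dsimp only
  have hcongr : List.map
      (((fun j => (PySem.List.min? j fun x => x).getD 0 * m) ∘
        fun i => PySem.List.slice s (some i) (some (i + m))) ∘ (fun j => (↑n : Int) - m * ↑j) ∘ Nat.succ)
      (List.range q) =
      List.map (fun j => s.getD (r + M * (q - 1 - j)) 0 * m) (List.range q) := by
    apply List.map_congr_left
    intro j hj
    have hjq : j < q := List.mem_range.mp hj
    obtain ⟨e, hqe⟩ : ∃ e, q = (j + 1) + e := ⟨q - 1 - j, by omega⟩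
    have he : q - 1 - j = e := by omega
    set i : Nat := r + M * e with hi
    have hcast : (↑n : Int) - m * (↑(j + 1) : Int) = (i : Nat) := by
      rw [hmM, hi]
      have : n = M * (j + 1) + (r + M * e) := by rw [hn, hqe]; ring
      rw [this]; push_cast; ring
    have hin : i < n := by
      have h1 : 0 < M * (j + 1) := Nat.mul_pos hM (Nat.succ_pos j)
      have h2 : n = M * (j + 1) + i := by rw [hn, hqe, hi]; ring
      omega
    simp only [Function.comp_apply, Nat.succ_eq_add_one]
    rw [hcast]
    rw [PySem.List.slice_toNat s (by positivity) (by rw [hmM]; positivity)]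
    have ht1 : ((i : Nat) : Int).toNat = i := by omega
    have ht2 : (((i : Nat) : Int) + m).toNat - ((i : Nat) : Int).toNat = M := by
      rw [hmM]; omega
    rw [ht2, ht1, min?_window_sorted s hsp i M hin hM]
    rw [he]
    simp only [Option.getD_some, hi]
  rw [hcongr]
  have hsum1 : (List.map (fun j => s.getD (r + M * (q - 1 - j)) 0 * m) (List.range q)).sum
      = ∑ j ∈ Finset.range q, s.getD (r + M * (q - 1 - j)) 0 * m := rfl
  have hsum2 : (List.map (fun k => s.getD (r + M * k) 0) (List.range q)).sum
      = ∑ k ∈ Finset.range q, s.getD (r + M * k) 0 := rfl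
  rw [hsum1, hsum2, Finset.sum_range_reflect (fun j => s.getD (r + M * j) 0 * m) q,
    ← Finset.sum_mul, mul_comm]
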